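-- pv_equiv track=rewrite | github.com/kezhouca/CoQAbot | infer.py | punc_sep
-- ===== SOURCE A (Python) =====
-- def is_whitespace(c):
--     if c == " " or c == "\t" or c == "\r" or c == "\n" or ord(c) == 0x202F:
--         return True
--     return False
--
-- def is_punc(c):
--     if c in '?,.!()[]-_\'"':
--         return True
--     return False
--
-- def punc_sep(s):
--     tokens = []
--     is_prev_white = True
--     for c in s:
--         if is_whitespace(c):
--             is_prev_white = True
--         else:
--             if is_punc(c):
--                 tokens.append(c)
--                 is_prev_white = True
--             else:
--                 if is_prev_white:
--                     is_prev_white = False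
--                     tokens.append(c)
--                 else:
--                     tokens[-1] += c
--     return ' '.join(tokens)
-- ===== SOURCE B (Python) =====
-- import re
--
-- _TOKEN_RE = re.compile(r'[?,.!()\[\]\-_\'"]|[^ \t\r\n\u202f?,.!()\[\]\-_\'"]+')
--
-- def punc_sep(s):
--     return ' '.join(_TOKEN_RE.findall(s))
-- ===== Notes on version B (the rewrite author's own statement) =====
-- stated objective: faster
-- what changed: Replaces the character-by-character state machine (tokens list plus is_prev_white flag, growing the last token by repeated string concatenation) with a single precompiled regex findall that matches one punctuation char or a maximal word run, then a single join.
import Mathlib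
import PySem

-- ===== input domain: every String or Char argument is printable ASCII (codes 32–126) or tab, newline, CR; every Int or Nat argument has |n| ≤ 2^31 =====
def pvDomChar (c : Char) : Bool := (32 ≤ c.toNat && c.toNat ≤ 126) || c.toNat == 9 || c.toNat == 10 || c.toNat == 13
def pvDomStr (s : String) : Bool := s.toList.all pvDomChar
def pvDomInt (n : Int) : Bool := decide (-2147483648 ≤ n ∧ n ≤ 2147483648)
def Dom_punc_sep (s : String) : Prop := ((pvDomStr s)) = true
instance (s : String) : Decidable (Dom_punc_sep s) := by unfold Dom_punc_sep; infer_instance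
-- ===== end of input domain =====

-- B replaces A's state-machine loop by a regex-style tokenizer (punct char | maximal word run),
-- joined with ' '; equal return value on all of Dom.

-- ===== PORT A =====
-- is_whitespace(c)
def pyIsWhitespace (c : Char) : Bool :=
  c == ' ' || c == '\t' || c == '\r' || c == '\n' || c.toNat == 0x202F

-- is_punc(c): c in '?,.!()[]-_\'"'
def pyIsPunc (c : Char) : Bool :=
  ("?,.!()[]-_'\"".toList).contains c

-- loop body of A; tokens are List Char (strings as char lists); tokens[-1] += c is
-- dropLast ++ [last ++ [c]] (getLastD [] stands for tokens[-1]; with is_prev_white = false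
-- the tokens list is never empty, so this is exact)
def puncStepA (st : List (List Char) × Bool) (c : Char) : List (List Char) × Bool :=
  if pyIsWhitespace c then (st.1, true)
  else if pyIsPunc c then (st.1 ++ [[c]], true)
  else if st.2 then (st.1 ++ [[c]], false)
  else (st.1.dropLast ++ [st.1.getLastD [] ++ [c]], false)

def punc_sep (s : String) : String :=
  String.ofList (PySem.Chars.join [' '] (s.toList.foldl puncStepA ([], true)).1)

-- ===== PORT B =====
-- a char the regex's word-run class [^ \t\r\n\u202f?,.!()\[\]\-_'"]+ accepts
def wordChar (c : Char) : Bool := !pyIsWhitespace c && !pyIsPunc c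

-- hand port of _TOKEN_RE.findall: at each position, whitespace matches neither alternative
-- (skip), a punct char is its own token, otherwise a maximal word run is one token; exact
def tokensB : List Char → List (List Char)
  | [] => []
  | c :: rest =>
    if pyIsWhitespace c then tokensB rest
    else if pyIsPunc c then [c] :: tokensB rest
    else (c :: rest.takeWhile wordChar) :: tokensB (rest.dropWhile wordChar)
termination_by l => l.length
decreasing_by
  · simp
  · simp
  · exact Nat.lt_succ_of_le (List.length_dropWhile_le _ _)

def punc_sep_alt (s : String) : String :=
  String.ofList (PySem.Chars.join [' '] (tokensB s.toList))

-- ===== PRECONDITION & SPEC =====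
def Spec_punc_sep (s : String) (out : String) : Prop := out = punc_sep_alt s
instance (s : String) (out : String) : Decidable (Spec_punc_sep s out) := by unfold Spec_punc_sep; infer_instance

-- ===== CLAIM (what is proved, stated in full; the proofs are below) =====
def Claim_equal_punc_sep : Prop := ∀ (s : String), Dom_punc_sep s → Spec_punc_sep s (punc_sep s)

-- ===== LEMMAS AND PROOFS =====
-- B's tokenization when a word token w is still open (is_prev_white = false in A)
def midB (w : List Char) (cs : List Char) : List (List Char) :=
  (w ++ cs.takeWhile wordChar) :: tokensB (cs.dropWhile wordChar)

theorem punc_loop_lemma (cs : List Char) :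
    (∀ toks, (List.foldl puncStepA (toks, true) cs).1 = toks ++ tokensB cs) ∧
    (∀ toks w, (List.foldl puncStepA (toks ++ [w], false) cs).1 = toks ++ midB w cs) := by
  induction cs with
  | nil => simp [tokensB, midB]
  | cons c rest ih =>
    obtain ⟨ih1, ih2⟩ := ih
    by_cases hws : pyIsWhitespace c = true
    · have hw : wordChar c = false := by simp [wordChar, hws]
      constructor
      · intro toks
        simp [List.foldl_cons, puncStepA, hws, ih1, tokensB]
      · intro toks w
        have := ih1 (toks ++ [w])
        simp [List.foldl_cons, puncStepA, hws, midB, tokensB, hw] at this ⊢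
        simpa using this
    · simp only [Bool.not_eq_true] at hws
      by_cases hp : pyIsPunc c = true
      · have hw : wordChar c = false := by simp [wordChar, hp]
        constructor
        · intro toks
          have := ih1 (toks ++ [[c]])
          simp [List.foldl_cons, puncStepA, hws, hp, tokensB] at this ⊢
          simpa using this
        · intro toks w
          have := ih1 (toks ++ [w] ++ [[c]])
          simp [List.foldl_cons, puncStepA, hws, hp, midB, tokensB, hw] at this ⊢
          simpa using this
      · simp only [Bool.not_eq_true] at hp
        have hw : wordChar c = true := by simp [wordChar, hws, hp]
        constructor
        · intro toks
          have := ih2 toks [c]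
          simp [List.foldl_cons, puncStepA, hws, hp, midB, tokensB] at this ⊢
          simpa using this
        · intro toks w
          have := ih2 toks (w ++ [c])
          simp [List.foldl_cons, puncStepA, hws, hp, midB, hw] at this ⊢
          simpa using this

theorem punc_sep_spec : Claim_equal_punc_sep := by
  intro s _
  unfold Spec_punc_sep punc_sep punc_sep_alt
  rw [show (s.toList.foldl puncStepA ([], true)).1 = [] ++ tokensB s.toList from
    (punc_loop_lemma s.toList).1 []]
  rfl
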